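-- pv_equiv track=rewrite | github.com/natmali404/clobber-ai-simulation | gamestate.py | generate_starting_board
-- ===== SOURCE A (Python) =====
-- from typing import List, Optional
--
-- def generate_starting_board(n: int, m: int) -> List[List[str]]:
--     new_board = []
--     is_black = True
--     for j in range(m):
--         new_row = []
--         if j > 0: #make sure its checkered
--             is_black = new_board[j-1][0] == "W"
--         for i in range(n):
--             new_row.append("B" if is_black else "W")
--             is_black = not is_black
--         new_board.append(new_row)
--     return new_board
-- ===== SOURCE B (Python) =====
-- from typing import List
--
-- def generate_starting_board(n: int, m: int) -> List[List[str]]: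
--     if m <= 0:
--         return []
--     black_first = ["B" if i % 2 == 0 else "W" for i in range(n)]
--     white_first = ["W" if i % 2 == 0 else "B" for i in range(n)]
--     return [list(black_first if j % 2 == 0 else white_first) for j in range(m)]
-- ===== Notes on version B (the rewrite author's own statement) =====
-- stated objective: simpler
-- what changed: Each cell is determined by the closed-form index parities: B precomputes the two parity template rows once and emits a copy per row by j%2, eliminating A's carried is_black toggle and its cross-row lookup new_board[j-1][0].
-- crash fix: When n <= 0 and m >= 2 (Raises_ states this up to m <= 10^6 for checkability), A raises IndexError reading new_board[j-1][0] of an empty previous row; B returns a list of m empty rows. — e.g. on generate_starting_board(0, 2): A raises IndexError, B returns [[], []]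
import Mathlib
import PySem

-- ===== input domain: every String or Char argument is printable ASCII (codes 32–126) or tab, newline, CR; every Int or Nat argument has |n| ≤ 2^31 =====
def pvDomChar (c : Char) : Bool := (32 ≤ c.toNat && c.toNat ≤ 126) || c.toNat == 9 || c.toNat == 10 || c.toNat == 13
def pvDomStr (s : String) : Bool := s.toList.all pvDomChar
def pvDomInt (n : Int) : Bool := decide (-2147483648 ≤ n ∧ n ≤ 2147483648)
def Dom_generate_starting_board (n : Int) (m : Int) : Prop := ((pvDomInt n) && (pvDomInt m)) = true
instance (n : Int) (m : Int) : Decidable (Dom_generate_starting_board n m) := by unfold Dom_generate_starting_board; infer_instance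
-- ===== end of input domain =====

-- B replaces A's carried is_black toggle and previous-row lookup by closed-form index
-- parity: two precomputed template rows, one copied per row by j % 2. A raises IndexError
-- when n ≤ 0 ∧ m ≥ 2 (empty previous row); those inputs are outside Pre_.

-- ===== PORT A =====
-- literal port of A: outer fold carries (new_board, is_black); for j > 0 is_black is
-- re-read from new_board[j-1][0] (pyGet?; the '.getD' defaults only fire where Python
-- raises IndexError, i.e. outside Pre_); inner fold appends and toggles.
def generate_starting_board (n : Int) (m : Int) : List (List String) :=
  ((PySem.List.pyRange 0 m 1).foldl
    (fun (st : List (List String) × Bool) (j : Int) =>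
      let is_black : Bool :=
        if j > 0 then
          ((PySem.List.pyGet? ((PySem.List.pyGet? st.1 (j - 1)).getD []) 0).getD "") == "W"
        else st.2
      let inner :=
        (PySem.List.pyRange 0 n 1).foldl
          (fun (r : List String × Bool) (_i : Int) =>
            (r.1 ++ [if r.2 then "B" else "W"], !r.2))
          (([] : List String), is_black)
      (st.1 ++ [inner.1], inner.2))
    (([] : List (List String)), true)).1

-- ===== PORT B =====
-- port of Source B: two template rows from the column parity i % 2, then each row j is a
-- copy of the template selected by the row parity j % 2 (list() copy = the list itself here)
def generate_starting_board_alt (n : Int) (m : Int) : List (List String) :=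
  if m ≤ 0 then [] else
  let black_first := (PySem.List.pyRange 0 n 1).map (fun i =>
    if PySem.Int.mod i 2 == 0 then "B" else "W")
  let white_first := (PySem.List.pyRange 0 n 1).map (fun i =>
    if PySem.Int.mod i 2 == 0 then "W" else "B")
  (PySem.List.pyRange 0 m 1).map (fun j =>
    if PySem.Int.mod j 2 == 0 then black_first else white_first)

-- ===== PRECONDITION & SPEC =====
-- Pre_ excludes exactly the inputs where A raises IndexError: n ≤ 0 with m ≥ 2
-- (new_board[j-1][0] on an empty previous row).
def Pre_generate_starting_board (n : Int) (m : Int) : Prop := 1 ≤ n ∨ m ≤ 1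
instance (n : Int) (m : Int) : Decidable (Pre_generate_starting_board n m) := by
  unfold Pre_generate_starting_board; infer_instance
def pvWitness_generate_starting_board : Int × Int := (3, 4)

-- On n ≤ 0 and m ≥ 2 A raises IndexError; B returns m empty rows.
-- (Raises_ carries a bound m ≤ 10^6 so the region is checkable in reasonable time.)
def Raises_generate_starting_board (n : Int) (m : Int) : Prop := n ≤ 0 ∧ 2 ≤ m ∧ m ≤ 1000000
instance (n : Int) (m : Int) : Decidable (Raises_generate_starting_board n m) := by
  unfold Raises_generate_starting_board; infer_instance
def pvRaiseWitness_generate_starting_board : Int × Int := (0, 2)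
def pvRaiseWitnessOut_generate_starting_board : List (List String) := [[], []]

def Spec_generate_starting_board (n : Int) (m : Int) (out : List (List String)) : Prop :=
  out = generate_starting_board_alt n m
instance (n : Int) (m : Int) (out : List (List String)) : Decidable (Spec_generate_starting_board n m out) := by
  unfold Spec_generate_starting_board; infer_instance

-- ===== CLAIM (what is proved, stated in full; the proofs are below) =====
def Claim_equal_generate_starting_board : Prop :=
  ∀ (n : Int) (m : Int), Dom_generate_starting_board n m →
    Pre_generate_starting_board n m →
    Spec_generate_starting_board n m (generate_starting_board n m)

def Claim_raises_generate_starting_board : Prop :=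
  (∀ (n : Int) (m : Int), Dom_generate_starting_board n m →
      Raises_generate_starting_board n m → ¬ Pre_generate_starting_board n m) ∧
  (Dom_generate_starting_board (pvRaiseWitness_generate_starting_board.1) (pvRaiseWitness_generate_starting_board.2) ∧
   Raises_generate_starting_board (pvRaiseWitness_generate_starting_board.1) (pvRaiseWitness_generate_starting_board.2) ∧
   generate_starting_board_alt (pvRaiseWitness_generate_starting_board.1) (pvRaiseWitness_generate_starting_board.2) = pvRaiseWitnessOut_generate_starting_board)

-- ===== LEMMAS AND PROOFS =====

-- the cell value A/B compute at column i of a row whose first cell is black iff b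
def pvCell (b : Bool) (i : Nat) : String :=
  if (decide (i % 2 = 0)) == b then "B" else "W"

-- row j of the board, n' columns
def pvRow (n' j : Nat) : List String :=
  (List.range n').map (pvCell (decide (j % 2 = 0)))

def pvBoard (n' m' : Nat) : List (List String) :=
  (List.range m').map (pvRow n')

-- is_black entering row k (A's semantics, with the lookup default for n' = 0)
def pvBIn (n' k : Nat) : Bool :=
  if k = 0 then true else if n' = 0 then false else decide (k % 2 = 0)

-- is_black after processing m' rows
def pvSndAfter (n' m' : Nat) : Bool :=
  match m' with
  | 0 => true
  | Nat.succ k => pvBIn n' k ^^ decide (n' % 2 = 1)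

theorem pvRange0 (n : Int) :
    PySem.List.pyRange 0 n 1 = (List.range n.toNat).map (fun k : Nat => (k : Int)) := by
  rw [PySem.List.pyRange_one]; simp

theorem pvCell_succ (b : Bool) (i : Nat) : pvCell b (i + 1) = pvCell (!b) i := by
  unfold pvCell
  rcases Nat.mod_two_eq_zero_or_one i with h | h <;> cases b <;>
    simp [Nat.add_mod, h]

theorem pvCell_zero (b : Bool) : pvCell b 0 = if b then "B" else "W" := by
  cases b <;> simp [pvCell]

theorem pvInner (l : List Int) (acc : List String) (b : Bool) :
    l.foldl (fun (r : List String × Bool) (_i : Int) =>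
        (r.1 ++ [if r.2 then "B" else "W"], !r.2)) (acc, b)
      = (acc ++ (List.range l.length).map (pvCell b), b ^^ decide (l.length % 2 = 1)) := by
  induction l generalizing acc b with
  | nil => simp
  | cons x xs ih =>
    simp only [List.foldl_cons, ih, List.length_cons, Prod.mk.injEq]
    refine ⟨?_, ?_⟩
    · rw [List.range_succ_eq_map]
      simp only [List.map_cons, List.map_map]
      have hmap : (pvCell b ∘ fun i => i + 1) = pvCell (!b) := by
        funext i; exact pvCell_succ b i
      rw [hmap, pvCell_zero]
      simp
    · rcases Nat.mod_two_eq_zero_or_one xs.length with h | h <;> cases b <;>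
        simp [Nat.add_mod, h]

theorem pvRow_bIn (n' j : Nat) :
    (List.range n').map (pvCell (pvBIn n' j)) = pvRow n' j := by
  unfold pvRow pvBIn
  rcases Nat.eq_zero_or_pos n' with h | h
  · subst h; simp
  · rcases Nat.eq_zero_or_pos j with hj | hj
    · subst hj; simp
    · simp [Nat.ne_of_gt h, Nat.ne_of_gt hj]

theorem pvOuter (n : Int) (m' : Nat) :
    ((List.range m').map (fun k : Nat => (k : Int))).foldl
      (fun (st : List (List String) × Bool) (j : Int) =>
        let is_black : Bool :=
          if j > 0 then
            ((PySem.List.pyGet? ((PySem.List.pyGet? st.1 (j - 1)).getD []) 0).getD "") == "W"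
          else st.2
        let inner :=
          (PySem.List.pyRange 0 n 1).foldl
            (fun (r : List String × Bool) (_i : Int) =>
              (r.1 ++ [if r.2 then "B" else "W"], !r.2))
            (([] : List String), is_black)
        (st.1 ++ [inner.1], inner.2))
      (([] : List (List String)), true)
    = (pvBoard n.toNat m', pvSndAfter n.toNat m') := by
  induction m' with
  | zero => simp [pvBoard, pvSndAfter]
  | succ k ih =>
    rw [List.range_succ, List.map_append, List.foldl_append, ih]
    simp only [List.map_cons, List.map_nil, List.foldl_cons, List.foldl_nil]
    have hblack :
        (if ((k : Int)) > 0 then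
          ((PySem.List.pyGet? ((PySem.List.pyGet? (pvBoard n.toNat k) ((k : Int) - 1)).getD []) 0).getD "") == "W"
        else pvSndAfter n.toNat k) = pvBIn n.toNat k := by
      rcases Nat.eq_zero_or_pos k with hk | hk
      · subst hk; simp [pvSndAfter, pvBIn]
      · have hkpos : ((k : Int)) > 0 := by exact_mod_cast hk
        have hcast : (k : Int) - 1 = ((k - 1 : Nat) : Int) := by
          have : (1:Nat) ≤ k := hk
          push_cast [this]; ring
        have hget : PySem.List.pyGet? (pvBoard n.toNat k) ((k : Int) - 1) = some (pvRow n.toNat (k - 1)) := by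
          rw [hcast, PySem.List.pyGet?_natCast]
          have hlt : k - 1 < (pvBoard n.toNat k).length := by
            simp [pvBoard]; omega
          rw [List.getElem?_eq_getElem hlt]
          simp [pvBoard]
        rw [if_pos hkpos, hget]
        rcases Nat.eq_zero_or_pos n.toNat with hn | hn
        · simp [pvRow, hn, PySem.List.pyGet?, PySem.List.pyIdx?, pvBIn, Nat.ne_of_gt hk]
        · have hrow : PySem.List.pyGet? (pvRow n.toNat (k - 1)) 0 = some (pvCell (decide ((k - 1) % 2 = 0)) 0) := by
            unfold pvRow
            rcases n' : n.toNat with _ | p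
            · omega
            · rw [List.range_succ_eq_map]
              simp
          simp only [Option.getD_some]
          rw [hrow]
          simp only [Option.getD_some]
          rw [pvCell_zero]
          have hknz : ¬ k = 0 := Nat.ne_of_gt hk
          unfold pvBIn
          have hk1 : (k - 1) % 2 = 1 - k % 2 := by omega
          rcases Nat.mod_two_eq_zero_or_one k with h2 | h2 <;>
            simp [hknz, Nat.ne_of_gt hn, h2, hk1]
    rw [hblack, pvRange0, pvInner]
    simp only [Prod.mk.injEq, List.length_map, List.length_range]
    refine ⟨?_, ?_⟩
    · simp only [List.nil_append]
      rw [pvRow_bIn]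
      simp [pvBoard, List.range_succ]
    · simp [pvSndAfter]

theorem pvTemplate (n : Int) (b : Bool) :
    (PySem.List.pyRange 0 n 1).map (fun i =>
        if PySem.Int.mod i 2 == 0 then (if b then "B" else "W") else (if b then "W" else "B"))
      = (List.range n.toNat).map (pvCell b) := by
  rw [pvRange0, List.map_map]
  apply List.map_congr_left
  intro i _
  simp only [Function.comp_def]
  have hcast : PySem.Int.mod ((i : Nat) : Int) 2 = (((i % 2 : Nat)) : Int) := by
    exact_mod_cast PySem.Int.mod_natCast i 2
  rw [hcast]
  unfold pvCell
  rcases Nat.mod_two_eq_zero_or_one i with hi | hi <;> cases b <;> simp [hi]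

theorem pvAlt_eq (n m : Int) :
    generate_starting_board_alt n m = pvBoard n.toNat m.toNat := by
  unfold generate_starting_board_alt pvBoard
  rcases le_or_gt m 0 with hm | hm
  · have h0 : m.toNat = 0 := by omega
    simp [hm, h0]
  rw [if_neg (by omega)]
  have hb := pvTemplate n true
  have hw := pvTemplate n false
  simp only [Bool.false_eq_true, if_true, if_false] at hb hw
  rw [hb, hw, pvRange0 m, List.map_map]
  apply List.map_congr_left
  intro j _
  simp only [Function.comp_def]
  have hcast : PySem.Int.mod ((j : Nat) : Int) 2 = (((j % 2 : Nat)) : Int) := by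
    exact_mod_cast PySem.Int.mod_natCast j 2
  rw [hcast]
  unfold pvRow
  rcases Nat.mod_two_eq_zero_or_one j with hj | hj <;> simp [hj]

theorem pvA_eq (n m : Int) :
    generate_starting_board n m = pvBoard n.toNat m.toNat := by
  unfold generate_starting_board
  rw [pvRange0 m, pvOuter n m.toNat]

-- ===== VERDICT (by name: the statement is the Claim_ definition above) =====
theorem generate_starting_board_spec : Claim_equal_generate_starting_board := by
  intro n m _hdom _hpre
  unfold Spec_generate_starting_board
  rw [pvA_eq, pvAlt_eq]

@[simp] theorem generate_starting_board_raises : Claim_raises_generate_starting_board := by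
  unfold Claim_raises_generate_starting_board
  refine ⟨?_, by decide⟩
  intro n m _ h
  unfold Raises_generate_starting_board at h
  unfold Pre_generate_starting_board
  omega
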